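-- pv_equiv track=rewrite | github.com/ndjman7/Algorithm | Exam/Naver/q1.py | solution
-- ===== SOURCE A (Python) =====
-- def solution(drum):
--     answer = 0
--
--     Y = len(drum)
--     X = len(drum[0])
--
--     def f(y, x, star):
--         if y == Y - 1:
--             return True
--
--         d = drum[y][x]
--         if d == '#':
--             return f(y+1 , x, star)
--
--         if d == '>':
--             if x+1 >= X:
--                 return False
--             return f(y, x+1, star)
--
--         if d == '<':
--             if x-1 < 0:
--                 return False
--             return f(y, x-1, star)
--
--         if d == '*':
--             if star:
--                 return f(y+1, x, False)
--             else:
--                 return False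
--
--
--     for s in range(X):
--         a = f(0, s, True)
--         if a:
--             answer += 1
--
--     return answer
-- ===== SOURCE B (Python) =====
-- def _cross(row, x, star, X):
--     # resolve the horizontal walk inside one row: return the (column, star)
--     # at which the path drops to the next row, or None if the path dies
--     for _ in range(X + 1):
--         c = row[x] if 0 <= x < len(row) else None
--         if c == '#':
--             return (x, star)
--         if c == '*':
--             return (x, False) if star else None
--         if c == '>':
--             x += 1
--             if x >= X:
--                 return None
--         elif c == '<':
--             x -= 1
--             if x < 0:
--                 return None
--         else:
--             return None
--     return None
--
--
-- def solution(drum):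
--     X = len(drum[0])
--     states = [(s, True) for s in range(X)]
--     for row in drum[:-1]:
--         states = [None if st is None else _cross(row, st[0], st[1], X) for st in states]
--     return sum(st is not None for st in states)
-- ===== Notes on version B (the rewrite author's own statement) =====
-- stated objective: alternative
-- what changed: A runs an unbounded recursive depth-first walk f(y,x,star) separately from each start column; B sweeps the grid row by row, advancing all start columns' states at once with an explicit bounded row-crossing subroutine, and counts the surviving states.
-- outside the precondition, e.g. on solution(['ab', 'c', 'de']): A returns 0, B returns 0; on solution(['**', '**', '><', '##']): A returns 0, B returns 0
import Mathlib
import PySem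

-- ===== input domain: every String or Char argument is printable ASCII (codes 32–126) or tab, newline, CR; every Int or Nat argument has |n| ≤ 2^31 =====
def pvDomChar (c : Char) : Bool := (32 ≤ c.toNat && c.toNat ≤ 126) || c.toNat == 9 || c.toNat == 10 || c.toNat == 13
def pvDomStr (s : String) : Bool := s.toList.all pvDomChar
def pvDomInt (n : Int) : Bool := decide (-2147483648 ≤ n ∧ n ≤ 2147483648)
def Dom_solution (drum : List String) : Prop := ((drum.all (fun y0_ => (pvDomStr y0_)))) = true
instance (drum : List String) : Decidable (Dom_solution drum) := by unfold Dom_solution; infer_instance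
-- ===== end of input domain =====

-- B replaces A's unbounded depth-first recursion f(y,x,star) per start column by a
-- row-by-row sweep that advances all start columns' states at once with a bounded
-- row-crossing subroutine; equivalence is proved on Pre_ (see its comment).

-- ===== PORT A =====
def pvCellA (drum : List String) (y x : Int) : Option Char :=
  match PySem.List.pyGet? drum y with
  | some r => PySem.Str.pyGet? r x
  | none => none

-- A's inner recursive f; the Nat argument is fuel, a pure totality guard: inside
-- Pre_ it is proved never to run out.  Python's falsy `None` result (any other
-- character) is the final `false`.
def pvFA (drum : List String) (Y X : Int) : Nat → Int → Int → Bool → Bool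
  | 0, _, _, _ => false
  | n+1, y, x, star =>
    if y = Y - 1 then true
    else
      match pvCellA drum y x with
      | some d =>
        if d = '#' then pvFA drum Y X n (y+1) x star
        else if d = '>' then (if X ≤ x + 1 then false else pvFA drum Y X n y (x+1) star)
        else if d = '<' then (if x - 1 < 0 then false else pvFA drum Y X n y (x-1) star)
        else if d = '*' then (if star then pvFA drum Y X n (y+1) x false else false)
        else false
      | none => false

def solution (drum : List String) : Int :=
  match PySem.List.pyGet? drum 0 with
  | none => 0
  | some r0 =>
    let Y : Int := drum.length
    let X : Int := PySem.Str.len r0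
    (PySem.List.pyRange 0 X 1).foldl
      (fun answer s =>
        if pvFA drum Y X (drum.length * (2 * r0.toList.length + 2) + 1) 0 s true
        then answer + 1 else answer) 0

-- ===== PORT B =====
-- _cross from Source B: the bounded horizontal walk inside one row.
def pvCross (r : String) (X : Int) : Nat → Int → Bool → Option (Int × Bool)
  | 0, _, _ => none
  | n+1, x, star =>
    match (if 0 ≤ x ∧ x < PySem.Str.len r then PySem.Str.pyGet? r x else none) with
    | some c =>
      if c = '#' then some (x, star)
      else if c = '*' then (if star then some (x, false) else none)
      else if c = '>' then (if X ≤ x + 1 then none else pvCross r X n (x+1) star)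
      else if c = '<' then (if x - 1 < 0 then none else pvCross r X n (x-1) star)
      else none
    | none => none

def pvStepRow (X : Int) (r : String) (st : Option (Int × Bool)) : Option (Int × Bool) :=
  match st with
  | none => none
  | some (x, star) => pvCross r X (X.toNat + 1) x star

def solution_alt (drum : List String) : Int :=
  match PySem.List.pyGet? drum 0 with
  | none => 0
  | some r0 =>
    let X : Int := PySem.Str.len r0
    let states := (PySem.List.pyRange 0 X 1).map (fun s => (some (s, true) : Option (Int × Bool)))
    let final := (PySem.List.slice drum none (some (-1))).foldl
      (fun sts r => sts.map (pvStepRow X r)) states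
    ((final.countP (fun st => st.isSome) : Nat) : Int)

-- ===== PRECONDITION & SPEC =====
def pvX (drum : List String) : Nat := drum.headI.toList.length

-- Pre_ excludes: the empty list (A raises IndexError); ragged grids in which some
-- walked row is shorter than the first row (A can raise IndexError there); and grids
-- with a '>' immediately followed by '<' inside the first X characters of a walked
-- row (A can recurse forever there, raising RecursionError).  It is a conservative
-- closed-form over-approximation: on inputs it excludes where the bad cells are
-- simply never reached, A still returns (and B agrees with it) — see the cites.
def Pre_solution (drum : List String) : Prop :=
  drum ≠ [] ∧
  ∀ r ∈ drum.dropLast,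
    pvX drum ≤ r.toList.length ∧
    ∀ i < pvX drum - 1, ¬(r.toList[i]? = some '>' ∧ r.toList[i+1]? = some '<')

instance (drum : List String) : Decidable (Pre_solution drum) := by
  unfold Pre_solution; infer_instance

def pvWitness_solution : List String := (["#", "#"])

def Spec_solution (drum : List String) (out : Int) : Prop := out = solution_alt drum
instance (drum : List String) (out : Int) : Decidable (Spec_solution drum out) := by
  unfold Spec_solution; infer_instance

-- ===== CLAIM (what is proved, stated in full; the proofs are below) =====
def Claim_equal_solution : Prop :=
  ∀ (drum : List String), Dom_solution drum → Pre_solution drum → Spec_solution drum (solution drum)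

-- ===== LEMMAS AND PROOFS =====

-- per-column row-by-row run (what B's fold computes for one start column)
def pvRun (X : Int) : List String → Int → Bool → Option (Int × Bool)
  | [], x, star => some (x, star)
  | r :: rs, x, star =>
    match pvCross r X (X.toNat + 1) x star with
    | none => none
    | some p => pvRun X rs p.1 p.2

-- horizontal part of the termination measure
def pvHM (X : Nat) (row : List Char) (x : Nat) : Nat :=
  match row[x]? with
  | some c => if c = '>' then X - x else if c = '<' then x + 1 else 0
  | none => 0

-- full termination measure for A's recursion under Pre_
def pvMu (drum : List String) (y x : Nat) : Nat :=
  (drum.length - 1 - y) * (pvX drum + 2) + pvHM (pvX drum) (drum.getD y "").toList x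

lemma pvHM_le (X : Nat) (row : List Char) (x : Nat) (hx : x < X) : pvHM X row x ≤ X := by
  unfold pvHM
  cases h : row[x]? with
  | none => simp
  | some c => dsimp; split_ifs <;> omega

lemma pvRow_mem (drum : List String) (y : Nat) (hy : y < drum.length - 1) :
    drum.getD y "" ∈ drum.dropLast := by
  have h1 : y < drum.dropLast.length := by
    simp only [List.length_dropLast]; omega
  have h2 : drum.getD y "" = drum.dropLast[y] := by
    rw [List.getElem_dropLast, List.getD_eq_getElem drum "" (by omega)]
  rw [h2]
  exact List.getElem_mem h1

lemma pvRun_step (drum : List String) (X : Int) (y : Nat) (hy : y < drum.length - 1)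
    (x : Int) (star : Bool) :
    pvRun X (drum.dropLast.drop y) x star =
      match pvCross (drum.getD y "") X (X.toNat + 1) x star with
      | none => none
      | some p => pvRun X (drum.dropLast.drop (y+1)) p.1 p.2 := by
  have h1 : y < drum.dropLast.length := by
    simp only [List.length_dropLast]; omega
  rw [List.drop_eq_getElem_cons h1]
  have h2 : drum.dropLast[y] = drum.getD y "" := by
    rw [List.getElem_dropLast, List.getD_eq_getElem drum "" (by omega)]
  rw [h2]
  rfl

lemma pvMu_descend (drum : List String) (y x x' : Nat) (hy : y < drum.length - 1)
    (hx' : x' < pvX drum) : pvMu drum (y+1) x' < pvMu drum y x := by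
  unfold pvMu
  have h1 : pvHM (pvX drum) (drum.getD (y+1) "").toList x' ≤ pvX drum :=
    pvHM_le _ _ _ hx'
  have h2 : drum.length - 1 - y = (drum.length - 1 - (y+1)) + 1 := by omega
  rw [h2, Nat.succ_mul]
  omega

lemma pvMaster (drum : List String)
    (hgood : ∀ r ∈ drum.dropLast,
      pvX drum ≤ r.toList.length ∧
      ∀ i < pvX drum - 1, ¬(r.toList[i]? = some '>' ∧ r.toList[i+1]? = some '<')) :
    ∀ (m y x : Nat) (star : Bool) (nA nB : Nat),
      y < drum.length - 1 → x < pvX drum →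
      pvMu drum y x ≤ m → pvMu drum y x < nA →
      pvHM (pvX drum) (drum.getD y "").toList x < nB →
      pvFA drum (drum.length : Int) (pvX drum : Int) nA (y : Int) (x : Int) star =
        (match pvCross (drum.getD y "") (pvX drum : Int) nB (x : Int) star with
         | none => false
         | some p => (pvRun (pvX drum : Int) (drum.dropLast.drop (y+1)) p.1 p.2).isSome) := by
  intro m
  induction m using Nat.strong_induction_on with
  | _ m IH =>
    intro y x star nA nB hy hx hmum hnA hnB
    obtain ⟨n, rfl⟩ : ∃ n, nA = n + 1 := ⟨nA - 1, by omega⟩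
    obtain ⟨nb, rfl⟩ : ∃ k, nB = k + 1 := ⟨nB - 1, by omega⟩
    have hL2 : 2 ≤ drum.length := by omega
    obtain ⟨hlen, hnopair⟩ := hgood _ (pvRow_mem drum y hy)
    have hxlen : x < (drum.getD y "").toList.length := lt_of_lt_of_le hx hlen
    set r := drum.getD y "" with hrdef
    set c : Char := r.toList[x]'hxlen with hcdef
    have hc : r.toList[x]? = some c := List.getElem?_eq_getElem hxlen
    have hry : drum[y]? = some r := by
      rw [List.getElem?_eq_getElem (show y < drum.length by omega)]
      rw [hrdef, List.getD_eq_getElem drum "" (show y < drum.length by omega)]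
    have hcellA : pvCellA drum (y : Int) (x : Int) = some c := by
      unfold pvCellA
      rw [PySem.List.pyGet?_natCast, hry]
      dsimp only
      rw [PySem.Str.pyGet?_natCast, hc]
    have hcellB : (if 0 ≤ (x : Int) ∧ (x : Int) < PySem.Str.len r
        then PySem.Str.pyGet? r (x : Int) else none) = some c := by
      rw [if_pos ⟨Int.natCast_nonneg x, by rw [PySem.Str.len_eq]; exact_mod_cast hxlen⟩]
      rw [PySem.Str.pyGet?_natCast, hc]
    have hA1 : pvFA drum (drum.length : Int) (pvX drum : Int) (n+1) (y:Int) (x:Int) star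
        = (if c = '#'
           then pvFA drum (drum.length : Int) (pvX drum : Int) n ((y:Int)+1) (x:Int) star
           else if c = '>'
           then (if (pvX drum:Int) ≤ (x:Int)+1 then false
                 else pvFA drum (drum.length : Int) (pvX drum : Int) n (y:Int) ((x:Int)+1) star)
           else if c = '<'
           then (if (x:Int)-1 < 0 then false
                 else pvFA drum (drum.length : Int) (pvX drum : Int) n (y:Int) ((x:Int)-1) star)
           else if c = '*'
           then (if star then pvFA drum (drum.length : Int) (pvX drum : Int) n ((y:Int)+1) (x:Int) false
                 else false)
           else false) := by
      simp only [pvFA]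
      rw [if_neg (show ¬((y:Int) = (drum.length:Int) - 1) by omega), hcellA]
    have hB1 : pvCross r (pvX drum : Int) (nb+1) (x:Int) star
        = (if c = '#' then some ((x:Int), star)
           else if c = '*' then (if star then some ((x:Int), false) else none)
           else if c = '>'
           then (if (pvX drum:Int) ≤ (x:Int)+1 then none
                 else pvCross r (pvX drum : Int) nb ((x:Int)+1) star)
           else if c = '<'
           then (if (x:Int)-1 < 0 then none
                 else pvCross r (pvX drum : Int) nb ((x:Int)-1) star)
           else none) := by
      simp only [pvCross]
      rw [hcellB]
    rw [hA1, hB1]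
    have hmupos : 2 ≤ pvMu drum y x := by
      unfold pvMu
      have h1 : 1 ≤ drum.length - 1 - y := by omega
      have h2 := Nat.mul_le_mul_right (pvX drum + 2) h1
      omega
    -- shared continuation for the two descending branches ('#' and fresh '*')
    have descend : ∀ star' : Bool,
        pvFA drum (drum.length : Int) (pvX drum : Int) n ((y:Int)+1) (x:Int) star'
          = (pvRun (pvX drum : Int) (drum.dropLast.drop (y+1)) (x:Int) star').isSome := by
      intro star'
      have hy1 : ((y:Int)+1) = (((y+1 : Nat)) : Int) := by push_cast; ring
      rw [hy1]
      rcases Nat.lt_or_ge (y+1) (drum.length - 1) with h5 | h5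
      · have hdec : pvMu drum (y+1) x < pvMu drum y x := pvMu_descend drum y x x hy hx
        have hih := IH (pvMu drum (y+1) x) (by omega) (y+1) x star' n (pvX drum + 1)
          h5 hx le_rfl (by omega)
          (by have := pvHM_le (pvX drum) (drum.getD (y+1) "").toList x hx; omega)
        rw [hih, pvRun_step drum _ (y+1) h5]
        simp only [Int.toNat_natCast]
        cases hcr : pvCross (drum.getD (y+1) "") (pvX drum : Int) (pvX drum + 1) (x:Int) star' <;>
          simp
      · have hdrop : drum.dropLast.drop (y+1) = [] := by
          apply List.drop_eq_nil_of_le; simp only [List.length_dropLast]; omega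
        rw [hdrop]
        simp only [pvRun, Option.isSome_some]
        obtain ⟨n', rfl⟩ : ∃ k, n = k + 1 := ⟨n - 1, by omega⟩
        simp only [pvFA]
        rw [if_pos (show (((y+1:Nat)):Int) = (drum.length:Int) - 1 by omega)]
    by_cases h1 : c = '#'
    · rw [if_pos h1, if_pos h1]
      dsimp only
      exact descend star
    by_cases h2 : c = '>'
    · rw [if_neg h1, if_neg h1, if_pos h2, if_neg (show c ≠ '*' by rw [h2]; decide),
         if_pos h2]
      by_cases hg : (pvX drum:Int) ≤ (x:Int)+1
      · rw [if_pos hg, if_pos hg]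
      · rw [if_neg hg, if_neg hg]
        have hx1 : x + 1 < pvX drum := by omega
        have hcast : ((x:Int)+1) = (((x+1 : Nat)) : Int) := by push_cast; ring
        rw [hcast]
        have hxg : r.toList[x]? = some '>' := by rw [hc, h2]
        have hnext : r.toList[x+1]? ≠ some '<' :=
          fun hcon => hnopair x (by omega) ⟨hxg, hcon⟩
        have hhm : pvHM (pvX drum) r.toList (x+1) < pvHM (pvX drum) r.toList x := by
          unfold pvHM
          rw [hxg]
          cases h6 : r.toList[x+1]? with
          | none => dsimp; omega
          | some c2 =>
            dsimp
            split_ifs with h7 h8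
            · omega
            · exact absurd (by rw [h6, h8]) hnext
            · omega
        have hdec : pvMu drum y (x+1) < pvMu drum y x := by
          unfold pvMu; rw [← hrdef]; omega
        have hih := IH (pvMu drum y (x+1)) (by omega) y (x+1) star n nb hy hx1
          le_rfl (by omega) (by rw [← hrdef]; omega)
        rw [← hrdef] at hih
        exact hih
    by_cases h3 : c = '<'
    · rw [if_neg h1, if_neg h2, if_pos h3, if_neg h1,
         if_neg (show c ≠ '*' by rw [h3]; decide), if_neg h2, if_pos h3]
      by_cases hg : (x:Int) - 1 < 0
      · rw [if_pos hg, if_pos hg]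
      · rw [if_neg hg, if_neg hg]
        have hx0 : 1 ≤ x := by omega
        have hx1 : x - 1 < pvX drum := by omega
        have hcast : ((x:Int)-1) = (((x-1 : Nat)) : Int) := by omega
        rw [hcast]
        have hxg : r.toList[x]? = some '<' := by rw [hc, h3]
        have hprev : r.toList[x-1]? ≠ some '>' :=
          fun hcon => hnopair (x-1) (by omega)
            ⟨hcon, by rw [show x-1+1 = x by omega]; exact hxg⟩
        have hhm : pvHM (pvX drum) r.toList (x-1) < pvHM (pvX drum) r.toList x := by
          unfold pvHM
          rw [hxg]
          cases h6 : r.toList[x-1]? with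
          | none => dsimp; omega
          | some c2 =>
            dsimp
            split_ifs with h7 h8
            · exact absurd (by rw [h6, h7]) hprev
            · omega
            · omega
        have hdec : pvMu drum y (x-1) < pvMu drum y x := by
          unfold pvMu; rw [← hrdef]; omega
        have hih := IH (pvMu drum y (x-1)) (by omega) y (x-1) star n nb hy hx1
          le_rfl (by omega) (by rw [← hrdef]; omega)
        rw [← hrdef] at hih
        exact hih
    by_cases h4 : c = '*'
    · rw [if_neg h1, if_neg h1, if_neg h2, if_neg h3, if_pos h4, if_pos h4]
      by_cases hs : star
      · rw [if_pos hs, if_pos hs]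
        dsimp only
        exact descend false
      · rw [if_neg hs, if_neg hs]
    · rw [if_neg h1, if_neg h1, if_neg h2, if_neg h4, if_neg h3, if_neg h2, if_neg h3,
         if_neg h4]

lemma pvKey (drum : List String) (hne : drum ≠ [])
    (hgood : ∀ r ∈ drum.dropLast,
      pvX drum ≤ r.toList.length ∧
      ∀ i < pvX drum - 1, ¬(r.toList[i]? = some '>' ∧ r.toList[i+1]? = some '<'))
    (y x : Nat) (hy : y ≤ drum.length - 1) (hx : x < pvX drum) (star : Bool) :
    pvFA drum (drum.length : Int) (pvX drum : Int)
        (drum.length * (2 * pvX drum + 2) + 1) (y : Int) (x : Int) star =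
      (pvRun (pvX drum : Int) (drum.dropLast.drop y) (x : Int) star).isSome := by
  have hL : drum.length ≠ 0 := by
    intro h; exact hne (List.eq_nil_of_length_eq_zero h)
  rcases Nat.lt_or_ge y (drum.length - 1) with hylt | hyge
  · -- y is a walked row: one step via pvRun_step, the rest via pvMaster
    have hm := pvHM_le (pvX drum) (drum.getD y "").toList x hx
    have hmu : pvMu drum y x < drum.length * (2 * pvX drum + 2) + 1 := by
      unfold pvMu
      have h1 : (drum.length - 1 - y) * (pvX drum + 2)
          ≤ (drum.length - 1) * (pvX drum + 2) := Nat.mul_le_mul_right _ (by omega)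
      have h2 : drum.length * (pvX drum + 2) ≤ drum.length * (2 * pvX drum + 2) :=
        Nat.mul_le_mul_left _ (by omega)
      have h3 : (drum.length - 1) * (pvX drum + 2) + (pvX drum + 2)
          = drum.length * (pvX drum + 2) := by
        rw [← Nat.succ_mul]; congr 1; omega
      omega
    have hmain := pvMaster drum hgood (pvMu drum y x) y x star
      (drum.length * (2 * pvX drum + 2) + 1) (pvX drum + 1) hylt hx le_rfl hmu
      (by omega)
    rw [pvRun_step drum _ y hylt, hmain]
    simp only [Int.toNat_natCast]
    cases hc : pvCross (drum.getD y "") (pvX drum : Int) (pvX drum + 1) (x : Int) star with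
    | none => simp
    | some p => simp
  · -- y = drum.length - 1 : the last row, both sides are immediately true
    have hyeq : y = drum.length - 1 := by omega
    have hdrop : drum.dropLast.drop y = [] := by
      apply List.drop_eq_nil_of_le
      simp only [List.length_dropLast]; omega
    rw [hdrop]
    simp only [pvRun, Option.isSome_some]
    simp only [pvFA]
    rw [if_pos (by omega)]

lemma pvFold_map (g : String → Option (Int × Bool) → Option (Int × Bool)) :
    ∀ (rows : List String) (init : List (Option (Int × Bool))),
      rows.foldl (fun sts r => sts.map (g r)) init
        = init.map (fun st => rows.foldl (fun st r => g r st) st) := by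
  intro rows
  induction rows with
  | nil => intro init; simp
  | cons r rs ih =>
    intro init
    simp only [List.foldl_cons, ih, List.map_map]
    rfl

lemma pvFold_none (X : Int) (rows : List String) :
    rows.foldl (fun st r => pvStepRow X r st) none = none := by
  induction rows with
  | nil => rfl
  | cons r rs ih => simpa [pvStepRow] using ih

lemma pvFold_some (X : Int) :
    ∀ (rows : List String) (x : Int) (star : Bool),
      rows.foldl (fun st r => pvStepRow X r st) (some (x, star)) = pvRun X rows x star := by
  intro rows
  induction rows with
  | nil => intro x star; rfl
  | cons r rs ih =>
    intro x star
    simp only [List.foldl_cons, pvRun]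
    have hstep : pvStepRow X r (some (x, star)) = pvCross r X (X.toNat + 1) x star := rfl
    rw [hstep]
    cases h : pvCross r X (X.toNat + 1) x star with
    | none => simp [pvFold_none]
    | some p => exact ih p.1 p.2

-- ===== VERDICT (by name: the statement is the Claim_ definition above) =====
theorem solution_spec : Claim_equal_solution := by
  unfold Claim_equal_solution
  intro drum _hdom hpre
  obtain ⟨hne, hgood⟩ := hpre
  unfold Spec_solution
  cases drum with
  | nil => exact absurd rfl hne
  | cons r0 rest =>
    simp only [solution, solution_alt, PySem.List.pyGet?_zero_cons,
      PySem.List.slice_to_neg_one]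
    conv_lhs => rw [PySem.List.foldl_count_if]
    rw [zero_add]
    rw [pvFold_map (pvStepRow (PySem.Str.len r0))]
    rw [List.map_map, List.countP_map]
    congr 1
    apply List.countP_congr
    intro s hs
    rw [PySem.Str.len_eq] at hs
    have hs' := PySem.List.mem_pyRange_one.mp hs
    have hsn : ((s.toNat : Nat) : Int) = s := Int.toNat_of_nonneg hs'.1
    have hx : s.toNat < pvX (r0 :: rest) := by
      have h2 := hs'.2
      have hXr : pvX (r0 :: rest) = r0.toList.length := rfl
      omega
    have hkey := pvKey (r0 :: rest) hne hgood 0 s.toNat (by omega) hx true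
    have hXr : pvX (r0 :: rest) = r0.toList.length := rfl
    rw [hXr] at hkey
    simp only [List.drop_zero, Nat.cast_zero, hsn] at hkey
    have hfold := pvFold_some (PySem.Str.len r0) (r0 :: rest).dropLast s true
    simp only [Function.comp_apply]
    simp only [PySem.Str.len_eq] at hfold ⊢
    rw [hkey, hfold]
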